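-- pv_equiv track=rewrite | github.com/Srijan272002/starboard-ai-assignment | backend/app/api/standardization/data_transformer.py | _get_unit_category
-- ===== SOURCE A (Python) =====
-- from typing import Any, Dict, List, Optional, Union, Callable
--
-- def _get_unit_category(unit1: str, unit2: str) -> Optional[str]:
--     """Determine the category of units for conversion"""
--     all_categories = {
--         "area": ["sqft", "sq_ft", "square_feet", "sqm", "sq_m", "square_meters", "acre", "acres"],
--         "currency": ["usd", "dollars", "cad", "eur", "gbp"],
--         "length": ["ft", "feet", "foot", "m", "meter", "meters", "in", "inch", "inches", "yd", "yard", "yards"]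
--     }
--
--     for category, units in all_categories.items():
--         if unit1.lower() in units and unit2.lower() in units:
--             return category
--
--     return None
-- ===== SOURCE B (Python) =====
-- _ALL_CATEGORIES = {
--     "area": ["sqft", "sq_ft", "square_feet", "sqm", "sq_m", "square_meters", "acre", "acres"],
--     "currency": ["usd", "dollars", "cad", "eur", "gbp"],
--     "length": ["ft", "feet", "foot", "m", "meter", "meters", "in", "inch", "inches", "yd", "yard", "yards"],
-- }
--
-- # reverse index: unit string -> its category (built once)
-- _UNIT_TO_CATEGORY = {u: c for c, us in _ALL_CATEGORIES.items() for u in us}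
--
-- def _get_unit_category(unit1, unit2):
--     c1 = _UNIT_TO_CATEGORY.get(unit1.lower())
--     c2 = _UNIT_TO_CATEGORY.get(unit2.lower())
--     return c1 if c1 is not None and c1 == c2 else None
-- ===== Notes on version B (the rewrite author's own statement) =====
-- stated objective: idiomatic
-- what changed: Replaced the per-category loop with two membership tests each by a reverse index dict (unit -> category) built once; the result is two direct lookups and one comparison, with no loop over categories at call time.
import Mathlib
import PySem

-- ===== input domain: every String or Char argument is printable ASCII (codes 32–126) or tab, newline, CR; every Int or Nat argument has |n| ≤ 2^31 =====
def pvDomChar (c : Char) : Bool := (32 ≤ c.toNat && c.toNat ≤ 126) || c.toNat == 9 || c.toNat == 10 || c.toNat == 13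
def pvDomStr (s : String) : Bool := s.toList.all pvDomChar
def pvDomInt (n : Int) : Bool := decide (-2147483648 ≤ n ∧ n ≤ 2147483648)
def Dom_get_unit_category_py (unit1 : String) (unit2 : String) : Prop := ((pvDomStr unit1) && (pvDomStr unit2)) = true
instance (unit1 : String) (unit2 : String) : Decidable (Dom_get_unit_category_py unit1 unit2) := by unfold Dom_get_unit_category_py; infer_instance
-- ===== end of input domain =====

-- B replaces A's per-category loop by a reverse index (unit → category) built once, so a call is two lookups and one comparison (idiomatic; same result since the table's categories are disjoint).

-- ===== PORT A =====
def pvAllCategories : List (String × List String) :=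
  [("area", ["sqft", "sq_ft", "square_feet", "sqm", "sq_m", "square_meters", "acre", "acres"]),
   ("currency", ["usd", "dollars", "cad", "eur", "gbp"]),
   ("length", ["ft", "feet", "foot", "m", "meter", "meters", "in", "inch", "inches", "yd", "yard", "yards"])]

-- the 'for category, units in all_categories.items()' loop, first-match return
def pvLoopA (unit1 : String) (unit2 : String) : List (String × List String) → Option String
  | [] => none
  | (category, units) :: rest =>
      if units.contains (PySem.Str.lower unit1) && units.contains (PySem.Str.lower unit2) then
        some category
      else pvLoopA unit1 unit2 rest

def get_unit_category_py (unit1 : String) (unit2 : String) : Option String :=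
  pvLoopA unit1 unit2 pvAllCategories

-- ===== PORT B =====
-- the dict comprehension (over the same category table) {u: c for c, us in … for u in us}
def pvUnitToCategory : PySem.Dict String String :=
  pvAllCategories.foldl (fun d cu => cu.2.foldl (fun d u => d.insert u cu.1) d) PySem.Dict.empty

def get_unit_category_py_alt (unit1 : String) (unit2 : String) : Option String :=
  let c1 := pvUnitToCategory.get? (PySem.Str.lower unit1)
  let c2 := pvUnitToCategory.get? (PySem.Str.lower unit2)
  match c1 with
  | some c => if c2 = some c then some c else none
  | none => none

-- ===== PRECONDITION & SPEC =====
def Spec_get_unit_category_py (unit1 : String) (unit2 : String) (out : Option String) : Prop := out = get_unit_category_py_alt unit1 unit2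
instance (unit1 : String) (unit2 : String) (out : Option String) : Decidable (Spec_get_unit_category_py unit1 unit2 out) := by unfold Spec_get_unit_category_py; infer_instance

-- ===== CLAIM (what is proved, stated in full; the proofs are below) =====
def Claim_equal_get_unit_category_py : Prop := ∀ (unit1 : String) (unit2 : String), Dom_get_unit_category_py unit1 unit2 → Spec_get_unit_category_py unit1 unit2 (get_unit_category_py unit1 unit2)

-- ===== LEMMAS AND PROOFS =====

def pvAreaUnits : List String := ["sqft", "sq_ft", "square_feet", "sqm", "sq_m", "square_meters", "acre", "acres"]
def pvCurUnits : List String := ["usd", "dollars", "cad", "eur", "gbp"]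
def pvLenUnits : List String := ["ft", "feet", "foot", "m", "meter", "meters", "in", "inch", "inches", "yd", "yard", "yards"]

-- the built reverse dict, as a literal
set_option maxHeartbeats 1000000 in
lemma pvRev_eq : pvUnitToCategory = PySem.Dict.mk
    [("sqft","area"),("sq_ft","area"),("square_feet","area"),("sqm","area"),("sq_m","area"),("square_meters","area"),("acre","area"),("acres","area"),
     ("usd","currency"),("dollars","currency"),("cad","currency"),("eur","currency"),("gbp","currency"),
     ("ft","length"),("feet","length"),("foot","length"),("m","length"),("meter","length"),("meters","length"),("in","length"),("inch","length"),("inches","length"),("yd","length"),("yard","length"),("yards","length")] := by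
  rfl


lemma pvRev_area (s : String) (h : s ∈ pvAreaUnits) : pvUnitToCategory.get? s = some "area" := by
  rw [pvRev_eq]; fin_cases h <;> rfl

lemma pvRev_cur (s : String) (h : s ∈ pvCurUnits) : pvUnitToCategory.get? s = some "currency" := by
  rw [pvRev_eq]; fin_cases h <;> rfl

lemma pvRev_len (s : String) (h : s ∈ pvLenUnits) : pvUnitToCategory.get? s = some "length" := by
  rw [pvRev_eq]; fin_cases h <;> rfl

lemma pvRev_none (s : String) (ha : s ∉ pvAreaUnits) (hc : s ∉ pvCurUnits) (hl : s ∉ pvLenUnits) :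
    pvUnitToCategory.get? s = none := by
  rw [pvRev_eq]
  simp only [pvAreaUnits, pvCurUnits, pvLenUnits, List.mem_cons, List.not_mem_nil, or_false,
    not_or] at ha hc hl
  simp only [PySem.Dict.get?_mk_cons, beq_iff_eq]
  simp [Ne.symm ha.1, Ne.symm ha.2.1, Ne.symm ha.2.2.1, Ne.symm ha.2.2.2.1, Ne.symm ha.2.2.2.2.1,
    Ne.symm ha.2.2.2.2.2.1, Ne.symm ha.2.2.2.2.2.2.1, Ne.symm ha.2.2.2.2.2.2.2,
    Ne.symm hc.1, Ne.symm hc.2.1, Ne.symm hc.2.2.1, Ne.symm hc.2.2.2.1, Ne.symm hc.2.2.2.2,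
    Ne.symm hl.1, Ne.symm hl.2.1, Ne.symm hl.2.2.1, Ne.symm hl.2.2.2.1, Ne.symm hl.2.2.2.2.1,
    Ne.symm hl.2.2.2.2.2.1, Ne.symm hl.2.2.2.2.2.2.1, Ne.symm hl.2.2.2.2.2.2.2.1,
    Ne.symm hl.2.2.2.2.2.2.2.2.1, Ne.symm hl.2.2.2.2.2.2.2.2.2.1,
    Ne.symm hl.2.2.2.2.2.2.2.2.2.2.1, Ne.symm hl.2.2.2.2.2.2.2.2.2.2.2, PySem.Dict.get?]

lemma pv_not_ac (s : String) (h : s ∈ pvAreaUnits) : s ∉ pvCurUnits := by fin_cases h <;> decide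
lemma pv_not_al (s : String) (h : s ∈ pvAreaUnits) : s ∉ pvLenUnits := by fin_cases h <;> decide
lemma pv_not_cl (s : String) (h : s ∈ pvCurUnits) : s ∉ pvLenUnits := by fin_cases h <;> decide

set_option maxHeartbeats 2000000 in
lemma pv_key (s t : String) :
    pvLoopA s t pvAllCategories = get_unit_category_py_alt s t := by
  unfold get_unit_category_py_alt
  simp only [pvLoopA, pvAllCategories]
  show (if (pvAreaUnits.contains (PySem.Str.lower s) && pvAreaUnits.contains (PySem.Str.lower t)) = true then some "area"
    else if (pvCurUnits.contains (PySem.Str.lower s) && pvCurUnits.contains (PySem.Str.lower t)) = true then some "currency"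
    else if (pvLenUnits.contains (PySem.Str.lower s) && pvLenUnits.contains (PySem.Str.lower t)) = true then some "length"
    else none) = _
  generalize PySem.Str.lower s = x
  generalize PySem.Str.lower t = y
  by_cases ha1 : x ∈ pvAreaUnits <;> by_cases hc1 : x ∈ pvCurUnits <;> by_cases hl1 : x ∈ pvLenUnits <;>
    by_cases ha2 : y ∈ pvAreaUnits <;> by_cases hc2 : y ∈ pvCurUnits <;> by_cases hl2 : y ∈ pvLenUnits <;>
    first
      | exact absurd hc1 (pv_not_ac x ha1)
      | exact absurd hl1 (pv_not_al x ha1)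
      | exact absurd hl1 (pv_not_cl x hc1)
      | exact absurd hc2 (pv_not_ac y ha2)
      | exact absurd hl2 (pv_not_al y ha2)
      | exact absurd hl2 (pv_not_cl y hc2)
      | simp_all [pvRev_area, pvRev_cur, pvRev_len, pvRev_none]

-- ===== VERDICT (by name: the statement is the Claim_ definition above) =====
theorem get_unit_category_py_spec : Claim_equal_get_unit_category_py := by
  intro unit1 unit2 _
  unfold Spec_get_unit_category_py get_unit_category_py
  exact pv_key unit1 unit2
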